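-- pv_equiv track=rewrite | github.com/microsoft/Form-Recognizer-Toolkit | SampleCode/Python/sample_disambiguate_similar_characters.py | generate_confusing_strings
-- ===== SOURCE A (Python) =====
-- def generate_confusing_strings(input_string):
--     # Define a dictionary of characters that can be confusing
--     confusing_chars = {
--         '0': ['O'],
--         'O': ['0'],
--         '1': ['I', 'l'],
--         'I': ['1', 'l'],
--         'l': ['1', 'I']
--     }
--
--     result = [input_string]
--
--     # Recursive function to generate all combinations of confusing strings
--     def generate_combinations(input_str, index, current_combination):
--         # If we have processed all characters in the string, add the current combination to the result
--         if index == len(input_str):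
--             result.append(current_combination)
--             return
--
--         char = input_str[index]
--         if char in confusing_chars:
--             replacements = confusing_chars[char]
--             for replacement in replacements:
--                 new_combination = current_combination[:index] + replacement + current_combination[index+1:]
--                 generate_combinations(input_str, index+1, new_combination)
--         else:
--             # If the current character is not in the confusing characters dictionary, just move on to the next character
--             generate_combinations(input_str, index+1, current_combination)
--
--     generate_combinations(input_string, 0, input_string)
--     return result
-- ===== SOURCE B (Python) =====
-- def generate_confusing_strings(input_string):
--     confusing_chars = {
--         '0': ['O'],
--         'O': ['0'],
--         '1': ['I', 'l'],
--         'I': ['1', 'l'],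
--         'l': ['1', 'I']
--     }
--     # Left-fold cartesian product: extend every partial prefix by each choice
--     # for the next character (a confusing char's replacements, else the char itself).
--     combos = ['']
--     for ch in input_string:
--         options = confusing_chars.get(ch, [ch])
--         combos = [prefix + opt for prefix in combos for opt in options]
--     return [input_string] + combos
-- ===== Notes on version B (the rewrite author's own statement) =====
-- stated objective: idiomatic
-- what changed: Replaces A's recursive index-slicing DFS (with an appended-to outer result) by a left-fold cartesian product: one choice list per character (replacements for confusing chars, the char itself otherwise), prefixes extended one character at a time.
import Mathlib
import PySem

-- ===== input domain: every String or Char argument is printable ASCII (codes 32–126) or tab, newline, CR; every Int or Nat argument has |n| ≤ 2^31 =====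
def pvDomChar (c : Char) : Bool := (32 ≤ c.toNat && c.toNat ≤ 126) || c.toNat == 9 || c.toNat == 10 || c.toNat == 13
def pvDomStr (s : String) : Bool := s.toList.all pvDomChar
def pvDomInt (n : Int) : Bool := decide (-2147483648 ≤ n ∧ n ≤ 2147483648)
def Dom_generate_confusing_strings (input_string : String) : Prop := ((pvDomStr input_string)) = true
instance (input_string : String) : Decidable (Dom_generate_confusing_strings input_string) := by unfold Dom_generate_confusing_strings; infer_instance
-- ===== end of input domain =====

-- B replaces A's index-slicing DFS by a left-fold cartesian product of per-character choice lists (idiomatic; same cost).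

-- ===== PORT A =====
-- the confusing_chars dict literal
def pvConfA : PySem.Dict Char (List Char) :=
  PySem.Dict.ofList [('0', ['O']), ('O', ['0']), ('1', ['I', 'l']), ('I', ['1', 'l']), ('l', ['1', 'I'])]

-- generate_combinations: fuel = remaining characters (the Python recursion advances index by 1 until len);
-- current[:index] / current[index+1:] are List.take / List.drop (indices are nonnegative, exact here).
def pvGenA (s : List Char) (fuel index : Nat) (cur : List Char) : List (List Char) :=
  if index = s.length then [cur]
  else
    match fuel with
    | f + 1 =>
      match s[index]? with
      | some c =>
        match pvConfA.get? c with
        | some reps =>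
            reps.flatMap (fun r =>
              pvGenA s f (index + 1) (cur.take index ++ [r] ++ cur.drop (index + 1)))
        | none => pvGenA s f (index + 1) cur
      | none => []  -- unreachable: index < len
    | 0 => []  -- unreachable: fuel covers every call made from index 0

def generate_confusing_strings (input_string : String) : List String :=
  let s := input_string.toList
  input_string :: (pvGenA s s.length 0 s).map String.ofList

-- ===== PORT B =====
def pvConfB : PySem.Dict Char (List Char) :=
  PySem.Dict.ofList [('0', ['O']), ('O', ['0']), ('1', ['I', 'l']), ('I', ['1', 'l']), ('l', ['1', 'I'])]

def generate_confusing_strings_alt (input_string : String) : List String :=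
  let combos := input_string.toList.foldl
    (fun combos ch =>
      let options := pvConfB.getD ch [ch]
      combos.flatMap (fun pre => options.map (fun o => pre ++ [o])))
    [([] : List Char)]
  input_string :: combos.map String.ofList

-- ===== PRECONDITION & SPEC =====
def Spec_generate_confusing_strings (input_string : String) (out : List String) : Prop := out = generate_confusing_strings_alt input_string
instance (input_string : String) (out : List String) : Decidable (Spec_generate_confusing_strings input_string out) := by unfold Spec_generate_confusing_strings; infer_instance

-- ===== CLAIM (what is proved, stated in full; the proofs are below) =====
def Claim_equal_generate_confusing_strings : Prop := ∀ (input_string : String), Dom_generate_confusing_strings input_string → Spec_generate_confusing_strings input_string (generate_confusing_strings input_string)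

-- ===== LEMMAS AND PROOFS =====

-- the per-character choice list (replacements of a confusing char, else the char)
def pvChoice (c : Char) : List Char := pvConfA.getD c [c]

-- cartesian product of choice lists, leftmost position most significant
def pvProd : List (List Char) → List (List Char)
  | [] => [[]]
  | xs :: rest => xs.flatMap (fun x => (pvProd rest).map (x :: ·))

theorem pvChoice_of_some {c : Char} {reps : List Char} (h : pvConfA.get? c = some reps) :
    pvChoice c = reps := by
  simp [pvChoice, PySem.Dict.getD, h]

theorem pvChoice_of_none {c : Char} (h : pvConfA.get? c = none) :
    pvChoice c = [c] := by
  simp [pvChoice, PySem.Dict.getD, h]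

theorem pvGenA_eq_prod (s : List Char) :
    ∀ (fuel index : Nat) (cur : List Char),
      index ≤ s.length →
      s.length - index ≤ fuel →
      cur.drop index = s.drop index →
      pvGenA s fuel index cur
        = (pvProd ((s.drop index).map pvChoice)).map (fun t => cur.take index ++ t) := by
  intro fuel
  induction fuel with
  | zero =>
      intro index cur hle hf hdrop
      have hidx : index = s.length := by omega
      have h1 : s.drop index = [] := by rw [hidx]; simp
      have h2 : cur.length ≤ index := by
        have := List.drop_eq_nil_iff.mp (hdrop.trans h1); omega
      rw [pvGenA.eq_def, if_pos hidx, h1]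
      simp [pvProd, List.take_of_length_le h2]
  | succ f ih =>
      intro index cur hle hf hdrop
      by_cases hidx : index = s.length
      · have h1 : s.drop index = [] := by rw [hidx]; simp
        have h2 : cur.length ≤ index := by
          have := List.drop_eq_nil_iff.mp (hdrop.trans h1); omega
        rw [pvGenA.eq_def, if_pos hidx, h1]
        simp [pvProd, List.take_of_length_le h2]
      · have hlt : index < s.length := by omega
        have hgl : s[index]? = some s[index] := List.getElem?_eq_getElem hlt
        have hcl : index < cur.length := by
          have := congrArg List.length hdrop
          simp only [List.length_drop] at this
          omega
        have hcg : cur[index] = s[index] := by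
          have h0 := congrArg (fun l => l[0]?) hdrop
          simp only [List.getElem?_drop, Nat.add_zero] at h0
          rw [List.getElem?_eq_getElem hcl, List.getElem?_eq_getElem hlt] at h0
          exact Option.some.inj h0
        have htail : cur.drop (index + 1) = s.drop (index + 1) := by
          have := congrArg List.tail hdrop
          simpa [List.tail_drop] using this
        have hdc : s.drop index = s[index] :: s.drop (index + 1) :=
          List.drop_eq_getElem_cons hlt
        rw [pvGenA.eq_def, if_neg hidx, hgl]
        cases h : pvConfA.get? s[index] with
        | some reps =>
            have hch : pvChoice s[index] = reps := pvChoice_of_some h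
            have hstep : ∀ r : Char,
                pvGenA s f (index + 1) (cur.take index ++ r :: cur.drop (index + 1))
                  = (pvProd ((s.drop (index + 1)).map pvChoice)).map
                      (fun t => cur.take index ++ r :: t) := by
              intro r
              have e : cur.take index ++ r :: cur.drop (index + 1)
                  = (cur.take index ++ [r]) ++ cur.drop (index + 1) := by simp
              have hlen : (cur.take index ++ [r]).length = index + 1 := by
                simp [List.length_take, Nat.min_eq_left (Nat.le_of_lt hcl)]
              have hdrop' : ((cur.take index ++ [r]) ++ cur.drop (index + 1)).drop (index + 1)
                  = s.drop (index + 1) := by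
                rw [List.drop_append_of_le_length (by omega), List.drop_of_length_le (by omega)]
                simpa [hlen] using htail
              have htake' : ((cur.take index ++ [r]) ++ cur.drop (index + 1)).take (index + 1)
                  = cur.take index ++ [r] := by
                rw [List.take_append_of_le_length (by omega), List.take_of_length_le (by omega)]
              rw [e, ih (index + 1) _ (by omega) (by omega) hdrop', htake']
              simp
            simp only [h, List.append_assoc, List.singleton_append, hstep, hdc,
              List.map_cons, pvProd, hch, List.map_flatMap, List.map_map, Function.comp_def]
        | none =>
            have hch : pvChoice s[index] = [s[index]] := pvChoice_of_none h
            have htake : cur.take (index + 1) = cur.take index ++ [s[index]] := by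
              rw [List.take_add_one, List.getElem?_eq_getElem hcl, hcg]
              rfl
            simp only [h]
            rw [ih (index + 1) cur (by omega) (by omega) htail]
            simp only [hdc, List.map_cons, pvProd, hch, List.map_map,
              Function.comp_def, List.flatMap_cons, List.flatMap_nil, List.append_nil,
              htake, List.append_assoc, List.singleton_append]

theorem pvFoldl_eq_prod (cs : List Char) :
    ∀ acc : List (List Char),
      cs.foldl
        (fun combos ch =>
          let options := pvConfB.getD ch [ch]
          combos.flatMap (fun pre => options.map (fun o => pre ++ [o]))) acc
        = acc.flatMap (fun p => (pvProd (cs.map pvChoice)).map (fun t => p ++ t)) := by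
  induction cs with
  | nil => intro acc; simp [pvProd]
  | cons c rest ih =>
      intro acc
      have hcc : pvConfB.getD c [c] = pvChoice c := rfl
      simp only [List.foldl_cons, ih, List.map_cons, pvProd, hcc, List.flatMap_assoc,
        List.flatMap_map, List.map_flatMap, List.map_map, List.append_assoc,
        List.singleton_append, Function.comp_def]

-- ===== VERDICT (by name: the statement is the Claim_ definition above) =====
theorem generate_confusing_strings_spec : Claim_equal_generate_confusing_strings := by
  intro input_string _
  unfold Spec_generate_confusing_strings generate_confusing_strings generate_confusing_strings_alt
  have hA := pvGenA_eq_prod input_string.toList input_string.toList.length 0 input_string.toList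
    (by omega) (by omega) rfl
  simp only [hA, pvFoldl_eq_prod]
  simp
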